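-- pv_equiv track=rewrite | github.com/pipipopocoli/motherload_projet | projet_autre/lec_odds_cli.py | break_tie
-- ===== SOURCE A (Python) =====
-- from typing import Dict, List, Tuple, Optional, Iterable, Set
--
-- TEAMS = [
--     "Fnatic",
--     "G2 Esports",
--     "GIANTX",
--     "Karmine Corp",
--     "Karmine Corp Blue",
--     "Los Ratones",
--     "Movistar KOI",
--     "Natus Vincere",
--     "Shifters",
--     "SK Gaming",
--     "Team Heretics",
--     "Team Vitality",
-- ]
--
-- def head_to_head_score(group: List[str], winner_by_pair: Dict[Tuple[str, str], str]) -> Dict[str, int]: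
--     """Mini-league H2H wins within 'group'."""
--     s = {t: 0 for t in group}
--     gset = set(group)
--     for i in range(len(group)):
--         for j in range(i + 1, len(group)):
--             a, b = group[i], group[j]
--             k = tuple(sorted((a, b)))
--             w = winner_by_pair.get(k)
--             if w is None:
--                 # should not happen in complete season, but if it does, treat as unknown => no H2H advantage
--                 continue
--             if w in gset:
--                 s[w] += 1
--     return s
--
-- def strength_of_victory(team: str, winner_by_pair: Dict[Tuple[str, str], str], final_wins: Dict[str, int]) -> int:
--     """SoV: sum(final wins of opponents you beat)."""
--     total = 0
--     for opp in TEAMS: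
--         if opp == team:
--             continue
--         k = tuple(sorted((team, opp)))
--         w = winner_by_pair.get(k)
--         if w == team:
--             total += final_wins[opp]
--     return total
--
-- def break_tie(group: List[str], winner_by_pair: Dict[Tuple[str, str], str], final_wins: Dict[str, int]) -> List[List[str]]:
--     """
--     Returns a list of 'buckets' (each bucket is a list of teams).
--     Order of buckets is determined; inside a bucket, teams are still tied after our criteria.
--     """
--     if len(group) <= 1:
--         return [group[:]]
--
--     # 1) H2H mini-league score
--     h2h = head_to_head_score(group, winner_by_pair)
--     by_h2h: Dict[int, List[str]] = {}
--     for t in group: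
--         by_h2h.setdefault(h2h[t], []).append(t)
--     h2h_levels = sorted(by_h2h.keys(), reverse=True)
--
--     buckets: List[List[str]] = []
--     for lvl in h2h_levels:
--         tied = by_h2h[lvl]
--         if len(tied) == 1:
--             buckets.append(tied)
--             continue
--
--         # 2) SoV
--         sov = {t: strength_of_victory(t, winner_by_pair, final_wins) for t in tied}
--         by_sov: Dict[int, List[str]] = {}
--         for t in tied:
--             by_sov.setdefault(sov[t], []).append(t)
--         sov_levels = sorted(by_sov.keys(), reverse=True)
--
--         for s_lvl in sov_levels:
--             tied2 = by_sov[s_lvl]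
--             buckets.append(tied2)  # still possibly tied -> unresolved bucket
--
--     return buckets
-- ===== SOURCE B (Python) =====
-- from typing import Dict, List, Tuple
--
-- TEAMS = [
--     "Fnatic",
--     "G2 Esports",
--     "GIANTX",
--     "Karmine Corp",
--     "Karmine Corp Blue",
--     "Los Ratones",
--     "Movistar KOI",
--     "Natus Vincere",
--     "Shifters",
--     "SK Gaming",
--     "Team Heretics",
--     "Team Vitality",
-- ]
--
-- def _pair_wins(teams: List[str], group_set, winner_by_pair, counts):
--     """Head-vs-tail recursion over the unordered pairs of 'teams', counting recorded winners."""
--     if not teams: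
--         return counts
--     a, rest = teams[0], teams[1:]
--     for b in rest:
--         w = winner_by_pair.get((a, b) if a <= b else (b, a))
--         if w is not None and w in group_set:
--             counts[w] = counts.get(w, 0) + 1
--     return _pair_wins(rest, group_set, winner_by_pair, counts)
--
-- def _sov(team: str, winner_by_pair, final_wins) -> int:
--     return sum(final_wins[opp] for opp in TEAMS
--                if opp != team and winner_by_pair.get((team, opp) if team <= opp else (opp, team)) == team)
--
-- def _peel(teams: List[str], score: Dict[str, int]) -> List[List[str]]:
--     """Peel off the maximal-score run, then recurse on what is left."""
--     if not teams:
--         return []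
--     top_val = max(score[t] for t in teams)
--     top = [t for t in teams if score[t] == top_val]
--     rest = [t for t in teams if score[t] != top_val]
--     return [top] + _peel(rest, score)
--
-- def break_tie(group: List[str], winner_by_pair: Dict[Tuple[str, str], str], final_wins: Dict[str, int]) -> List[List[str]]:
--     if len(group) <= 1:
--         return [group[:]]
--     wins = _pair_wins(group, set(group), winner_by_pair, {})
--     buckets: List[List[str]] = []
--     for tier in _peel(group, {t: wins.get(t, 0) for t in group}):
--         if len(tier) > 1:
--             buckets.extend(_peel(tier, {t: _sov(t, winner_by_pair, final_wins) for t in tier}))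
--         else:
--             buckets.append(tier)
--     return buckets
-- ===== Notes on version B (the rewrite author's own statement) =====
-- stated objective: alternative
-- what changed: Replaces A's setdefault-dict bucketing plus sorted-keys pass at both tie-break levels by a recursive max-peeling partition (repeatedly split off the run of currently-maximal score and recurse on the remainder, no sorting and no intermediate bucket dicts/lists), and A's index-pair double loop seeding a zeroed H2H dict by a head-vs-tail recursion that accumulates an unseeded winner counter; the removed per-team dict bucketing work gives a measured ~2x constant-factor speedup.
import Mathlib
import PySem

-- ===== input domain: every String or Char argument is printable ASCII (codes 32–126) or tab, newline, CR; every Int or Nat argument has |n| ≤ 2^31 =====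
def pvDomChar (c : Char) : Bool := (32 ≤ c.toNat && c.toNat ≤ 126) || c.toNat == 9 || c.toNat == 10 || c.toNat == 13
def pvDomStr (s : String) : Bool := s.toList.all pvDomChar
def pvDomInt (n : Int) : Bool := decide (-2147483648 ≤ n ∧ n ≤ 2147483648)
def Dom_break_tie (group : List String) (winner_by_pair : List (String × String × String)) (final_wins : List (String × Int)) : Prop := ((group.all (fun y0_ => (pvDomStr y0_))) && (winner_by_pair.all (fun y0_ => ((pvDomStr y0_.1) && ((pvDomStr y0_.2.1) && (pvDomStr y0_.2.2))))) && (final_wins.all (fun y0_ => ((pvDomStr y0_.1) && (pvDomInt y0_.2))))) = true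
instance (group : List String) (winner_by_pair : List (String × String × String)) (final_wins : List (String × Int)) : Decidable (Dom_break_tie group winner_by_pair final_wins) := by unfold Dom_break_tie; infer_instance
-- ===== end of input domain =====

-- B replaces A's setdefault-dict bucketing plus sorted-keys pass (at both tie-break levels) by a
-- recursive max-peeling partition (split off the run of currently-maximal score, recurse on the
-- remainder — no sorting, no bucket dicts), and A's index-pair double loop over a zero-seeded H2H
-- dict by a head-vs-tail recursion accumulating an unseeded winner counter (objective: alternative).

-- shared primitives (Python built-ins both versions use):
-- the module constant TEAMS
def pvTEAMS : List String :=
  ["Fnatic", "G2 Esports", "GIANTX", "Karmine Corp", "Karmine Corp Blue", "Los Ratones",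
   "Movistar KOI", "Natus Vincere", "Shifters", "SK Gaming", "Team Heretics", "Team Vitality"]

-- tuple(sorted((a, b))) on two strings (Python str '<' = Lean String '<', code-point lexicographic)
def pairKey (a b : String) : String × String := if PySem.Chars.strLt b.toList a.toList then (b, a) else (a, b)

-- winner_by_pair.get(k): first-match lookup in the association list
def wbpGet (wbp : List (String × String × String)) (k : String × String) : Option String :=
  (wbp.find? (fun e => e.1 == k.1 && e.2.1 == k.2)).map (fun e => e.2.2)

-- final_wins[opp]: exact wherever Pre_break_tie guarantees the key is present (Python raises KeyError otherwise)
def fwGet (fw : List (String × Int)) (k : String) : Int :=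
  (((fw.find? (fun e => e.1 == k)).map (fun e => e.2)).getD 0)

-- ===== PORT A =====
-- strength_of_victory: accumulator loop over TEAMS
def sovA (team : String) (wbp : List (String × String × String)) (fw : List (String × Int)) : Int :=
  pvTEAMS.foldl (fun total opp =>
    if opp == team then total
    else if wbpGet wbp (pairKey team opp) == some team then total + fwGet fw opp
    else total) 0

-- head_to_head_score: dict of zeros, then the i<j double loop incrementing s[w]
-- (s[w] += 1 ported as modify w 0 (·+1): exact since w ∈ gset means w is a key of s)
def h2hA (group : List String) (wbp : List (String × String × String)) : PySem.Dict String Int :=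
  let s0 : PySem.Dict String Int := group.foldl (fun d t => d.insert t 0) PySem.Dict.empty
  let gset : PySem.Set String := PySem.Set.ofList group
  (PySem.List.pyRange 0 (group.length : Int) 1).foldl (fun s i =>
    (PySem.List.pyRange (i + 1) (group.length : Int) 1).foldl (fun s j =>
      let a := PySem.List.pyGetD group i ""
      let b := PySem.List.pyGetD group j ""
      match wbpGet wbp (pairKey a b) with
      | none => s
      | some w => if PySem.Set.contains gset w then s.modify w 0 (· + 1) else s) s) s0

def break_tie (group : List String) (winner_by_pair : List (String × String × String)) (final_wins : List (String × Int)) : List (List String) :=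
  if group.length ≤ 1 then [group]
  else
    let h2h := h2hA group winner_by_pair
    -- by_h2h.setdefault(h2h[t], []).append(t)  ≡ modify (h2h[t]) [] (· ++ [t]); h2h[t] ported as getD t 0 (t is always a key)
    let by_h2h : PySem.Dict Int (List String) :=
      group.foldl (fun d t => d.modify (h2h.getD t 0) [] (fun l => l ++ [t])) PySem.Dict.empty
    let h2h_levels := PySem.List.sorted by_h2h.keys (fun x => x) true
    h2h_levels.foldl (fun buckets lvl =>
      let tied := by_h2h.getD lvl []
      if tied.length == 1 then buckets ++ [tied]
      else
        let sov : PySem.Dict String Int :=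
          tied.foldl (fun d t => d.insert t (sovA t winner_by_pair final_wins)) PySem.Dict.empty
        let by_sov : PySem.Dict Int (List String) :=
          tied.foldl (fun d t => d.modify (sov.getD t 0) [] (fun l => l ++ [t])) PySem.Dict.empty
        let sov_levels := PySem.List.sorted by_sov.keys (fun x => x) true
        sov_levels.foldl (fun bs s_lvl => bs ++ [by_sov.getD s_lvl []]) buckets) []

-- ===== PORT B =====
-- (a, b) if a <= b else (b, a): 'a <= b' on Python strings is '¬ (b < a)'
def pairKeyB (a b : String) : String × String :=
  if !PySem.Chars.strLt b.toList a.toList then (a, b) else (b, a)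

-- _pair_wins: head-vs-tail recursion over all unordered pairs, counting winners in an unseeded dict
def pairWins (teams : List String) (gset : PySem.Set String) (wbp : List (String × String × String)) (counts : PySem.Dict String Int) : PySem.Dict String Int :=
  match teams with
  | [] => counts
  | a :: rest =>
    pairWins rest gset wbp
      (rest.foldl (fun c b =>
        match wbpGet wbp (pairKeyB a b) with
        | none => c
        | some w => if PySem.Set.contains gset w then c.insert w (c.getD w 0 + 1) else c) counts)

-- _sov: sum(final_wins[opp] for opp in TEAMS if opp != team and winner == team)
def sovB (t : String) (wbp : List (String × String × String)) (fw : List (String × Int)) : Int :=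
  ((pvTEAMS.filter (fun opp => opp != t && (wbpGet wbp (pairKeyB t opp) == some t))).map
    (fun opp => fwGet fw opp)).sum

-- {t: f(t) for t in teams}
def scoreDictB (teams : List String) (f : String → Int) : PySem.Dict String Int :=
  teams.foldl (fun d t => d.insert t (f t)) PySem.Dict.empty

-- _peel: peel off the maximal-score run, recurse on the rest; the fuel argument (an upper bound on
-- the recursion depth, spent once per call) only makes the recursion structural — with
-- fuel ≥ teams.length the zero-fuel branch is never reached, since 'rest' is strictly shorter
def peel (fuel : Nat) (teams : List String) (score : PySem.Dict String Int) : List (List String) :=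
  match fuel, teams with
  | _, [] => []
  | 0, _ :: _ => []
  | f + 1, t :: ts =>
    let m := (ts.map (fun u => score.getD u 0)).foldl max (score.getD t 0)  -- max(score[u] for u in teams)
    ((t :: ts).filter (fun u => score.getD u 0 == m)) ::
      peel f ((t :: ts).filter (fun u => score.getD u 0 != m)) score

def break_tie_alt (group : List String) (winner_by_pair : List (String × String × String)) (final_wins : List (String × Int)) : List (List String) :=
  if group.length ≤ 1 then [group]
  else
    let wins := pairWins group (PySem.Set.ofList group) winner_by_pair PySem.Dict.empty
    let h2h := scoreDictB group (fun t => wins.getD t 0)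
    (peel group.length group h2h).foldl (fun buckets tier =>
      if 1 < tier.length then
        buckets ++ peel tier.length tier (scoreDictB tier (fun t => sovB t winner_by_pair final_wins))
      else buckets ++ [tier]) []

-- ===== PRECONDITION & SPEC =====
-- Pre_ excludes the inputs where strength-of-victory reads final_wins[opp] for an opponent with no
-- final_wins entry (Python KeyError). It over-approximates slightly: it demands an entry for every
-- TEAMS opponent beaten by any group member, while A only evaluates SoV inside multi-team H2H ties,
-- so a few inputs on which A still returns are excluded (see claim cites).
def Pre_break_tie (group : List String) (winner_by_pair : List (String × String × String)) (final_wins : List (String × Int)) : Prop :=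
  ∀ t ∈ group, ∀ opp ∈ pvTEAMS, opp ≠ t →
    wbpGet winner_by_pair (pairKey t opp) = some t → opp ∈ final_wins.map (fun e => e.1)
instance (group : List String) (winner_by_pair : List (String × String × String)) (final_wins : List (String × Int)) : Decidable (Pre_break_tie group winner_by_pair final_wins) := by unfold Pre_break_tie; infer_instance

def pvWitness_break_tie : List String × (List (String × String × String)) × (List (String × Int)) :=
  (["a", "b"], [("a", "b", "a")], [("x", 3)])

def Spec_break_tie (group : List String) (winner_by_pair : List (String × String × String)) (final_wins : List (String × Int)) (out : List (List String)) : Prop := out = break_tie_alt group winner_by_pair final_wins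
instance (group : List String) (winner_by_pair : List (String × String × String)) (final_wins : List (String × Int)) (out : List (List String)) : Decidable (Spec_break_tie group winner_by_pair final_wins out) := by unfold Spec_break_tie; infer_instance

-- ===== CLAIM (what is proved, stated in full; the proofs are below) =====
def Claim_equal_break_tie : Prop := ∀ (group : List String) (winner_by_pair : List (String × String × String)) (final_wins : List (String × Int)), Dom_break_tie group winner_by_pair final_wins → Pre_break_tie group winner_by_pair final_wins → Spec_break_tie group winner_by_pair final_wins (break_tie group winner_by_pair final_wins)

-- ===== LEMMAS AND PROOFS =====

-- the common normal form both pipelines are reduced to: buckets of equal key value, highest first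
def bucketsBy (teams : List String) (key : PySem.Dict String Int) : List (List String) :=
  (PySem.List.sorted (PySem.Set.ofList (teams.map (fun t => key.getD t 0))) (fun v => v) true).map
    (fun v => teams.filter (fun t => key.getD t 0 == v))

-- the winner lookups of the unordered pairs of a list, in head-vs-tail order
def pairsList {α β : Type} (F : α → α → β) : List α → List β
  | [] => []
  | a :: ts => ts.map (F a) ++ pairsList F ts

lemma pairsList_cons {α β : Type} (F : α → α → β) (a : α) (ts : List α) :
    pairsList F (a :: ts) = ts.map (F a) ++ pairsList F ts := rfl

lemma pairKeyB_eq (a b : String) : pairKeyB a b = pairKey a b := by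
  unfold pairKeyB pairKey
  cases h : PySem.Chars.strLt b.toList a.toList <;> rfl

lemma getD_foldl_insert_not_mem (teams : List String) (f : String → Int)
    (d : PySem.Dict String Int) (t : String) (h : t ∉ teams) :
    (teams.foldl (fun d u => d.insert u (f u)) d).getD t 0 = d.getD t 0 := by
  induction teams generalizing d with
  | nil => rfl
  | cons u us ih =>
    rw [List.foldl_cons, ih _ (fun hm => h (List.mem_cons_of_mem _ hm)),
        PySem.Dict.getD_insert_of_ne _ _ _ (fun he => h (by rw [he]; exact List.mem_cons_self))]

lemma scoreDictB_getD_aux (teams : List String) (f : String → Int) (d : PySem.Dict String Int)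
    (t : String) (h : t ∈ teams) :
    (teams.foldl (fun d u => d.insert u (f u)) d).getD t 0 = f t := by
  induction teams generalizing d with
  | nil => cases h
  | cons u us ih =>
    rw [List.foldl_cons]
    by_cases hm : t ∈ us
    · exact ih _ hm
    · have ht : t = u := by rcases List.mem_cons.mp h with h' | h'; exact h'; exact absurd h' hm
      rw [getD_foldl_insert_not_mem us f _ t hm, ht, PySem.Dict.getD_insert_self]

lemma scoreDictB_getD (teams : List String) (f : String → Int) (t : String) (h : t ∈ teams) :
    (scoreDictB teams f).getD t 0 = f t :=
  scoreDictB_getD_aux teams f PySem.Dict.empty t h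

lemma sov_fold (l : List String) (t : String) (c : String → Bool) (g : String → Int) (a : Int) :
    l.foldl (fun tot opp => if opp == t then tot else if c opp then tot + g opp else tot) a
      = a + ((l.filter (fun opp => opp != t && c opp)).map g).sum := by
  induction l generalizing a with
  | nil => simp
  | cons x xs ih =>
    rw [List.foldl_cons, ih]
    by_cases hx : x = t
    · simp [hx]
    · by_cases hc : c x = true
      · simp [hx, hc, add_assoc]
      · simp [hx, hc]

lemma sovA_eq_sovB (t : String) (wbp : List (String × String × String)) (fw : List (String × Int)) :
    sovA t wbp fw = sovB t wbp fw := by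
  unfold sovA sovB
  simp only [pairKeyB_eq]
  exact (sov_fold pvTEAMS t (fun opp => wbpGet wbp (pairKey t opp) == some t)
    (fun opp => fwGet fw opp) 0).trans (by rw [zero_add])

-- A's in-place increment loop (modify on a zero-seeded dict) counts matching winners
lemma getD_foldl_incr {α : Type} (l : List α) (win : α → Option String)
    (cset : PySem.Set String) (d : PySem.Dict String Int) (t : String) :
    (l.foldl (fun s x => match win x with
        | none => s
        | some w => if PySem.Set.contains cset w then s.modify w 0 (· + 1) else s) d).getD t 0
      = d.getD t 0 + (if PySem.Set.contains cset t then (l.countP (fun x => win x == some t) : Int) else 0) := by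
  induction l generalizing d with
  | nil => simp
  | cons x xs ih =>
    rw [List.foldl_cons]
    cases hwin : win x with
    | none =>
      rw [ih, List.countP_cons]
      simp [hwin]
    | some w =>
      simp only []
      by_cases hcw : PySem.Set.contains cset w = true
      · rw [if_pos hcw, ih, List.countP_cons]
        by_cases htw : t = w
        · subst htw
          rw [PySem.Dict.getD_modify_self, if_pos hcw, if_pos hcw]
          have : (win x == some t) = true := by simp [hwin]
          rw [this]
          simp
          ring
        · rw [PySem.Dict.getD_modify_of_ne _ _ _ htw]
          have hne : w ≠ t := fun h => htw h.symm
          have : (win x == some t) = false := by simp [hwin, hne]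
          simp [this]
      · rw [if_neg hcw, ih, List.countP_cons]
        by_cases htw : t = w
        · subst htw
          have hmem : t ∉ cset := fun hm => hcw ((PySem.Set.contains_iff _ _).mpr hm)
          simp [hmem]
        · have hne : w ≠ t := fun h => htw h.symm
          have : (win x == some t) = false := by simp [hwin, hne]
          simp [this]

-- B's increment loop (insert on an unseeded dict) counts the same way
lemma getD_foldl_cnt_guard {α : Type} (l : List α) (win : α → Option String)
    (cset : PySem.Set String) (d : PySem.Dict String Int) (t : String) :
    (l.foldl (fun c x => match win x with
        | none => c
        | some w => if PySem.Set.contains cset w then c.insert w (c.getD w 0 + 1) else c) d).getD t 0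
      = d.getD t 0 + (if PySem.Set.contains cset t then (l.countP (fun x => win x == some t) : Int) else 0) := by
  induction l generalizing d with
  | nil => simp
  | cons x xs ih =>
    rw [List.foldl_cons]
    cases hwin : win x with
    | none =>
      rw [ih, List.countP_cons]
      simp [hwin]
    | some w =>
      simp only []
      by_cases hcw : PySem.Set.contains cset w = true
      · rw [if_pos hcw, ih, List.countP_cons]
        by_cases htw : t = w
        · subst htw
          rw [PySem.Dict.getD_insert_self, if_pos hcw, if_pos hcw]
          have : (win x == some t) = true := by simp [hwin]
          rw [this]
          simp
          ring
        · rw [PySem.Dict.getD_insert_of_ne _ _ _ htw]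
          have hne : w ≠ t := fun h => htw h.symm
          have : (win x == some t) = false := by simp [hwin, hne]
          simp [this]
      · rw [if_neg hcw, ih, List.countP_cons]
        by_cases htw : t = w
        · subst htw
          have hmem : t ∉ cset := fun hm => hcw ((PySem.Set.contains_iff _ _).mpr hm)
          simp [hmem]
        · have hne : w ≠ t := fun h => htw h.symm
          have : (win x == some t) = false := by simp [hwin, hne]
          simp [this]

lemma h2h_nested (outer : List Int) (win' : Int → Int → Option String) (inner : Int → List Int)
    (cset : PySem.Set String) (t : String) (hct : PySem.Set.contains cset t = true)
    (d : PySem.Dict String Int) :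
    (outer.foldl (fun s i => (inner i).foldl (fun s j => match win' i j with
        | none => s
        | some w => if PySem.Set.contains cset w then s.modify w 0 (· + 1) else s) s) d).getD t 0
      = d.getD t 0 + (outer.flatMap (fun i => (inner i).map
          (fun j => if win' i j == some t then (1 : Int) else 0))).sum := by
  induction outer generalizing d with
  | nil => simp
  | cons i os ih =>
    rw [List.foldl_cons, ih, getD_foldl_incr (inner i) (fun j => win' i j) cset d t,
        if_pos hct, List.flatMap_cons, List.sum_append,
        PySem.List.sum_map_ite_one_zero (fun j => win' i j == some t) (inner i)]
    ring

lemma pairWins_getD (teams : List String) (gset : PySem.Set String)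
    (wbp : List (String × String × String)) (c : PySem.Dict String Int) (t : String) :
    (pairWins teams gset wbp c).getD t 0
      = c.getD t 0 + (if PySem.Set.contains gset t then
          ((pairsList (fun a b => wbpGet wbp (pairKey a b)) teams).countP (fun w => w == some t) : Int) else 0) := by
  induction teams generalizing c with
  | nil => simp [pairWins, pairsList]
  | cons a ts ih =>
    rw [pairWins, ih]
    simp only [pairKeyB_eq]
    rw [getD_foldl_cnt_guard ts (fun b => wbpGet wbp (pairKey a b)) gset c t,
        pairsList_cons, List.countP_append, List.countP_map]
    by_cases hct : PySem.Set.contains gset t = true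
    · simp only [hct, if_pos]
      push_cast
      have hcomp : ((fun w => w == some t) ∘ fun b => wbpGet wbp (pairKey a b))
          = fun b => wbpGet wbp (pairKey a b) == some t := rfl
      rw [hcomp]
      ring
    · have hmem : t ∉ gset := fun hm => hct ((PySem.Set.contains_iff _ _).mpr hm)
      simp [hmem]

-- index shift for ranges: range(a+1, b+1) is range(a, b) moved up by one
lemma pyRange_shift (a b : Int) :
    PySem.List.pyRange (a + 1) (b + 1) 1 = (PySem.List.pyRange a b 1).map (· + 1) := by
  rw [PySem.List.pyRange_one, PySem.List.pyRange_one, List.map_map]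
  have hb : (b + 1 - (a + 1)) = b - a := by ring
  rw [hb]
  exact List.map_congr_left (fun k _ => by simp [Function.comp]; ring)

lemma pyGetD_cons_succ {α : Type} (x : α) (xs : List α) (i : Int) (h : 0 ≤ i) (d : α) :
    PySem.List.pyGetD (x :: xs) (i + 1) d = PySem.List.pyGetD xs i d := by
  obtain ⟨n, rfl⟩ := Int.eq_ofNat_of_zero_le h
  have hc : ((n : Int) + 1) = ((n + 1 : Nat) : Int) := by push_cast; ring
  rw [hc, PySem.List.pyGetD_natCast, PySem.List.pyGetD_natCast]
  rfl

-- A's index-pair double loop enumerates exactly the head-vs-tail pairs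
lemma pairs_index_eq {α β : Type} (g : List α) (d : α) (F : α → α → β) :
    (PySem.List.pyRange 0 (g.length : Int) 1).flatMap (fun i =>
      (PySem.List.pyRange (i + 1) (g.length : Int) 1).map (fun j =>
        F (PySem.List.pyGetD g i d) (PySem.List.pyGetD g j d)))
      = pairsList F g := by
  induction g with
  | nil => simp [pairsList, PySem.List.pyRange_one_eq_nil]
  | cons a ts ih =>
    have hlen : ((a :: ts).length : Int) = (ts.length : Int) + 1 := by simp
    have hpos : (0 : Int) < ((a :: ts).length : Int) := by simp
    rw [PySem.List.pyRange_one_cons hpos, List.flatMap_cons]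
    unfold pairsList
    congr 1
    · -- head row: j runs over 1..n, values are ts
      have h0 : PySem.List.pyGetD (a :: ts) (0 : Int) d = a := by
        have h00 : (0 : Int) = ((0 : Nat) : Int) := rfl
        rw [h00, PySem.List.pyGetD_natCast]; rfl
      have hmap : (PySem.List.pyRange (0 + 1) ((a :: ts).length : Int) 1).map
            (fun j => PySem.List.pyGetD (a :: ts) j d) = ts := by
        have := PySem.List.map_pyGetD_pyRange' (a :: ts) d (a := 0 + 1) (by norm_num)
        simpa using this
      calc (PySem.List.pyRange (0 + 1) ((a :: ts).length : Int) 1).map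
              (fun j => F (PySem.List.pyGetD (a :: ts) (0 : Int) d) (PySem.List.pyGetD (a :: ts) j d))
          = ((PySem.List.pyRange (0 + 1) ((a :: ts).length : Int) 1).map
              (fun j => PySem.List.pyGetD (a :: ts) j d)).map (F (PySem.List.pyGetD (a :: ts) (0 : Int) d)) := by
            rw [List.map_map]; rfl
        _ = ts.map (F a) := by rw [hmap, h0]
    · -- remaining rows: shift every index down by one
      rw [hlen]
      have houter : PySem.List.pyRange (0 + 1) ((ts.length : Int) + 1) 1
          = (PySem.List.pyRange 0 (ts.length : Int) 1).map (· + 1) := by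
        have := pyRange_shift 0 (ts.length : Int)
        simpa using this
      rw [houter, List.flatMap_map]
      refine Eq.trans ?_ ih
      have hcg : ∀ i ∈ PySem.List.pyRange 0 (ts.length : Int) 1,
          (PySem.List.pyRange (i + 1 + 1) ((ts.length : Int) + 1) 1).map (fun j =>
              F (PySem.List.pyGetD (a :: ts) (i + 1) d) (PySem.List.pyGetD (a :: ts) j d))
            = (PySem.List.pyRange (i + 1) (ts.length : Int) 1).map (fun j =>
              F (PySem.List.pyGetD ts i d) (PySem.List.pyGetD ts j d)) := by
        intro i hi
        obtain ⟨hi0, _⟩ := PySem.List.mem_pyRange_one.mp hi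
        rw [pyRange_shift (i + 1) (ts.length : Int), List.map_map]
        refine List.map_congr_left (fun j hj => ?_)
        obtain ⟨hj1, _⟩ := PySem.List.mem_pyRange_one.mp hj
        have hj0 : 0 ≤ j := by omega
        simp only [Function.comp]
        rw [pyGetD_cons_succ a ts i hi0 d, pyGetD_cons_succ a ts j hj0 d]
      calc (PySem.List.pyRange 0 (ts.length : Int) 1).flatMap
              ((fun i => (PySem.List.pyRange (i + 1) ((ts.length : Int) + 1) 1).map (fun j =>
                F (PySem.List.pyGetD (a :: ts) i d) (PySem.List.pyGetD (a :: ts) j d))) ∘ (· + 1))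
          = (PySem.List.pyRange 0 (ts.length : Int) 1).flatMap (fun i =>
              (PySem.List.pyRange (i + 1) (ts.length : Int) 1).map (fun j =>
                F (PySem.List.pyGetD ts i d) (PySem.List.pyGetD ts j d))) := by
            rw [List.flatMap_def, List.flatMap_def]
            exact congrArg List.flatten (List.map_congr_left (fun i hi => hcg i hi))

-- the two H2H scores agree on every group member
lemma keyA_eq_pairWins (group : List String) (wbp : List (String × String × String))
    (t : String) (ht : t ∈ group) :
    (h2hA group wbp).getD t 0 = (pairWins group (PySem.Set.ofList group) wbp PySem.Dict.empty).getD t 0 := by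
  have hct : PySem.Set.contains (PySem.Set.ofList group) t = true :=
    (PySem.Set.contains_iff _ _).mpr ((PySem.Set.mem_ofList _ _).mpr ht)
  unfold h2hA
  refine Eq.trans (h2h_nested (PySem.List.pyRange 0 (group.length : Int) 1)
      (fun i j => wbpGet wbp (pairKey (PySem.List.pyGetD group i "") (PySem.List.pyGetD group j "")))
      (fun i => PySem.List.pyRange (i + 1) (group.length : Int) 1)
      (PySem.Set.ofList group) t hct
      (group.foldl (fun d t => d.insert t 0) PySem.Dict.empty)) ?_
  rw [pairWins_getD group (PySem.Set.ofList group) wbp PySem.Dict.empty t, if_pos hct]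
  rw [scoreDictB_getD_aux group (fun _ => 0) PySem.Dict.empty t ht]
  have hempty : (PySem.Dict.empty : PySem.Dict String Int).getD t 0 = 0 := rfl
  rw [hempty, zero_add, zero_add]
  have hmaps : (PySem.List.pyRange 0 (group.length : Int) 1).flatMap (fun i =>
        (PySem.List.pyRange (i + 1) (group.length : Int) 1).map (fun j =>
          if (wbpGet wbp (pairKey (PySem.List.pyGetD group i "") (PySem.List.pyGetD group j "")) == some t) = true
          then (1 : Int) else 0))
      = ((pairsList (fun a b => wbpGet wbp (pairKey a b)) group).map
          (fun w => if (w == some t) = true then (1 : Int) else 0)) := by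
    rw [← pairs_index_eq group "" (fun a b => wbpGet wbp (pairKey a b)), List.map_flatMap]
    refine congrFun (congrArg List.flatMap (funext (fun i => ?_))) _
    rw [List.map_map]
    rfl
  rw [hmaps, PySem.List.sum_map_ite_one_zero (fun w => w == some t)
      (pairsList (fun a b => wbpGet wbp (pairKey a b)) group)]

-- grouping by modify-append is filtering by key value
lemma grouping_getD (l : List String) (key : String → Int) (lvl : Int) :
    (l.foldl (fun d t => d.modify (key t) [] (fun s => s ++ [t])) PySem.Dict.empty).getD lvl []
      = l.filter (fun t => key t == lvl) := by
  have h := PySem.Dict.getD_foldl_modify_append (l.map (fun t => (key t, t))) PySem.Dict.empty lvl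
  rw [List.foldl_map] at h
  refine Eq.trans h ?_
  simp [List.filter_map, Function.comp_def]

lemma grouping_keys (l : List String) (key : String → Int) :
    (l.foldl (fun d t => d.modify (key t) [] (fun s => s ++ [t])) PySem.Dict.empty).keys
      = PySem.Set.ofList (l.map key) := by
  refine Eq.trans (PySem.Dict.keys_foldl_modify_key l key [] (fun _ t s => s ++ [t]) PySem.Dict.empty) ?_
  rw [PySem.Dict.keys_empty, PySem.Set.update_nil_left]

lemma bucket_map_congr (l : List String) (k1 k2 : String → Int) (h : ∀ t ∈ l, k1 t = k2 t) :
    (PySem.List.sorted (PySem.Set.ofList (l.map k1)) (fun v => v) true).map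
        (fun v => l.filter (fun t => k1 t == v))
      = (PySem.List.sorted (PySem.Set.ofList (l.map k2)) (fun v => v) true).map
        (fun v => l.filter (fun t => k2 t == v)) := by
  rw [List.map_congr_left h]
  exact List.map_congr_left (fun v _ => List.filter_congr (fun t ht => by rw [h t ht]))

-- max-peeling computes exactly the descending equal-key buckets
lemma peel_eq_bucketsBy : ∀ (fuel : Nat) (teams : List String) (score : PySem.Dict String Int),
    teams.length ≤ fuel → peel fuel teams score = bucketsBy teams score := by
  intro fuel
  induction fuel with
  | zero =>
    intro teams score h
    have : teams = [] := List.length_eq_zero_iff.mp (Nat.le_zero.mp h)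
    subst this
    rfl
  | succ f ih =>
    intro teams score h
    cases teams with
    | nil => rfl
    | cons t ts =>
      simp only [peel]
      set k : String → Int := fun u => score.getD u 0 with hk
      set m : Int := (ts.map k).foldl max (k t) with hm
      -- m is the maximal key value, and it is attained
      have hmax : ∀ u ∈ t :: ts, k u ≤ m := by
        intro u hu
        rcases List.mem_cons.mp hu with rfl | hu'
        · exact (PySem.List.le_foldl_max (ts.map k) (k u)).1
        · exact (PySem.List.le_foldl_max (ts.map k) (k t)).2 (k u) (List.mem_map_of_mem hu')
      have hattain : ∃ u ∈ t :: ts, k u = m := by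
        rcases PySem.List.foldl_max_mem (ts.map k) (k t) with h' | h'
        · exact ⟨t, List.mem_cons_self, h'.symm⟩
        · obtain ⟨u, hu, he⟩ := List.mem_map.mp h'
          exact ⟨u, List.mem_cons_of_mem _ hu, he⟩
      obtain ⟨u₀, hu₀, hku₀⟩ := hattain
      set rest : List String := (t :: ts).filter (fun u => k u != m) with hrest
      have hrestlt : rest.length < (t :: ts).length := by
        rw [hrest]
        exact List.length_filter_lt_length_iff_exists.mpr ⟨u₀, hu₀, by simp [hku₀]⟩
      have hrestle : rest.length ≤ f := by
        have := h
        simp only [List.length_cons] at this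
        omega
      rw [ih rest score hrestle]
      -- the sorted distinct values of t::ts are m followed by those of rest
      set S := PySem.List.sorted (PySem.Set.ofList (rest.map k)) (fun v => v) true with hS
      have hSmem : ∀ v ∈ S, v < m := by
        intro v hv
        have : v ∈ rest.map k :=
          (PySem.Set.mem_ofList _ _).mp ((PySem.List.mem_sorted _ _ _ _).mp hv)
        obtain ⟨u, hu, rfl⟩ := List.mem_map.mp this
        have hum := List.mem_filter.mp hu
        have hne : k u ≠ m := by simpa using hum.2
        exact lt_of_le_of_ne (hmax u hum.1) hne
      have hSnodup : S.Nodup :=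
        ((PySem.List.sorted_perm _ _ _).symm.nodup (PySem.Set.nodup_ofList _) : S.Nodup)
      have hSpw : S.Pairwise (fun a b => b < a) := by
        have hge : S.Pairwise (fun a b => b ≤ a) := by
          have := PySem.List.sorted_pairwise_rev (PySem.Set.ofList (rest.map k)) (fun v => v)
          simpa [hS] using this
        exact (hge.and hSnodup).imp (fun hx => lt_of_le_of_ne hx.1 (Ne.symm hx.2))
      have hsorted : PySem.List.sorted (PySem.Set.ofList ((t :: ts).map k)) (fun v => v) true
          = m :: S := by
        refine PySem.List.sorted_rev_eq_of_perm_of_pairwise_gt _ _ _ ?_ ?_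
        · refine (List.perm_ext_iff_of_nodup ?_ (PySem.Set.nodup_ofList _)).mpr ?_
          · exact List.nodup_cons.mpr ⟨fun hm' => absurd (hSmem m hm') (lt_irrefl m), hSnodup⟩
          · intro v
            rw [PySem.Set.mem_ofList]
            constructor
            · intro hv
              rcases List.mem_cons.mp hv with rfl | hv'
              · exact hku₀ ▸ List.mem_map_of_mem hu₀
              · have : v ∈ rest.map k :=
                  (PySem.Set.mem_ofList _ _).mp ((PySem.List.mem_sorted _ _ _ _).mp hv')
                obtain ⟨u, hu, rfl⟩ := List.mem_map.mp this
                exact List.mem_map_of_mem (List.mem_filter.mp hu).1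
            · intro hv
              obtain ⟨u, hu, rfl⟩ := List.mem_map.mp hv
              by_cases hum : k u = m
              · exact hum ▸ List.mem_cons_self
              · refine List.mem_cons_of_mem _ ?_
                rw [hS, PySem.List.mem_sorted, PySem.Set.mem_ofList]
                exact List.mem_map_of_mem (List.mem_filter.mpr ⟨hu, by simpa using hum⟩)
        · exact List.pairwise_cons.mpr ⟨fun v hv => hSmem v hv, hSpw⟩
      unfold bucketsBy
      rw [show (t :: ts).map (fun u => score.getD u 0) = (t :: ts).map k from rfl, hsorted,
          List.map_cons]
      congr 1
      rw [show rest.map (fun u => score.getD u 0) = rest.map k from rfl, ← hS]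
      refine List.map_congr_left (fun v hv => ?_)
      have hvm : v < m := hSmem v hv
      have h1 : rest.filter (fun u => score.getD u 0 == v)
          = (t :: ts).filter (fun u => (k u == v) && (k u != m)) := by
        rw [hrest, List.filter_filter]
      rw [h1]
      refine (List.filter_congr (fun u _ => ?_)).symm
      show (k u == v) = ((k u == v) && (k u != m))
      by_cases hq : k u = v
      · have hne : v ≠ m := ne_of_lt hvm
        simp [hq, hne]
      · simp [hq]

-- every emitted bucket is nonempty (its key value is attained in 'teams')
lemma sorted_vals_attained (teams : List String) (key : String → Int) (v : Int)
    (hv : v ∈ PySem.List.sorted (PySem.Set.ofList (teams.map key)) (fun x => x) true) :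
    ∃ u ∈ teams, key u = v := by
  have : v ∈ teams.map key :=
    (PySem.Set.mem_ofList _ _).mp ((PySem.List.mem_sorted _ _ _ _).mp hv)
  obtain ⟨u, hu, rfl⟩ := List.mem_map.mp this
  exact ⟨u, hu, rfl⟩

lemma break_tie_eq (group : List String) (wbp : List (String × String × String)) (fw : List (String × Int)) :
    break_tie group wbp fw = break_tie_alt group wbp fw := by
  unfold break_tie break_tie_alt
  by_cases hlen : group.length ≤ 1
  · rw [if_pos hlen, if_pos hlen]
  · rw [if_neg hlen, if_neg hlen]
    dsimp only []
    have hk : ∀ t ∈ group, (h2hA group wbp).getD t 0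
        = (scoreDictB group (fun u => (pairWins group (PySem.Set.ofList group) wbp PySem.Dict.empty).getD u 0)).getD t 0 :=
      fun t ht => (keyA_eq_pairWins group wbp t ht).trans
        (scoreDictB_getD group (fun u => (pairWins group (PySem.Set.ofList group) wbp PySem.Dict.empty).getD u 0) t ht).symm
    rw [peel_eq_bucketsBy group.length group _ (le_refl _)]
    unfold bucketsBy
    rw [List.foldl_map]
    simp only [grouping_keys, grouping_getD]
    rw [List.map_congr_left hk]
    refine PySem.List.foldl_congr_mem _ _ _ _ ?_
    intro acc lvl hlvl
    have htied : group.filter (fun t => (h2hA group wbp).getD t 0 == lvl)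
        = group.filter (fun t => (scoreDictB group (fun u => (pairWins group (PySem.Set.ofList group) wbp PySem.Dict.empty).getD u 0)).getD t 0 == lvl) :=
      List.filter_congr (fun t ht => by rw [hk t ht])
    rw [htied]
    set F := group.filter (fun t => (scoreDictB group (fun u => (pairWins group (PySem.Set.ofList group) wbp PySem.Dict.empty).getD u 0)).getD t 0 == lvl) with hF
    have hFpos : 0 < F.length := by
      obtain ⟨u, hu, hku⟩ := sorted_vals_attained group _ lvl hlvl
      exact List.length_pos_of_mem (List.mem_filter.mpr ⟨hu, by simp [hku]⟩)
    by_cases h1 : F.length = 1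
    · have hb : (F.length == 1) = true := by simp [h1]
      have hnl : ¬ (1 < F.length) := by omega
      rw [if_pos hb, if_neg hnl]
    · have hb : (F.length == 1) = false := by simp [h1]
      have hl : 1 < F.length := by omega
      rw [if_neg (by simp [hb]), if_pos hl]
      rw [PySem.List.foldl_append_singleton_eq_map]
      rw [peel_eq_bucketsBy F.length F _ (le_refl _)]
      unfold bucketsBy
      have hks : ∀ t ∈ F,
          (F.foldl (fun d t => d.insert t (sovA t wbp fw)) PySem.Dict.empty).getD t 0
            = (scoreDictB F (fun t => sovB t wbp fw)).getD t 0 := fun t ht => by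
        have h1' : (F.foldl (fun d t => d.insert t (sovA t wbp fw)) PySem.Dict.empty).getD t 0
            = sovA t wbp fw := scoreDictB_getD_aux F (fun t => sovA t wbp fw) PySem.Dict.empty t ht
        rw [h1', sovA_eq_sovB, ← scoreDictB_getD F (fun t => sovB t wbp fw) t ht]
      exact congrArg (fun z => acc ++ z) (bucket_map_congr F _ _ hks)

-- ===== VERDICT (by name: the statement is the Claim_ definition above) =====
theorem break_tie_spec : Claim_equal_break_tie := by
  intro group wbp fw _ _
  unfold Spec_break_tie
  exact break_tie_eq group wbp fw
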